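-- pv_equiv track=rewrite | github.com/redars/Data-Science | Figma_project/modules/model_getter.py | GetMaxClusterSize
-- ===== SOURCE A (Python) =====
-- def GetMaxClusterSize(label):
--   res = 0
--   for i in range(0,9):
--     iterRes =0
--     for el in label:
--       if el == i:
--         iterRes +=1
--     if iterRes > res :
--       res = iterRes
--   return res
-- ===== SOURCE B (Python) =====
-- def GetMaxClusterSize(label):
--   counts = [0] * 9
--   for el in label:
--     if 0 <= el <= 8:
--       counts[el] = counts[el] + 1
--   return max(counts)
-- ===== Notes on version B (the rewrite author's own statement) =====
-- stated objective: faster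
-- what changed: B replaces A's nine full scans of label (one per candidate value 0-8) with a single pass building a 9-slot count table, followed by one max over the table.
import Mathlib
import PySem

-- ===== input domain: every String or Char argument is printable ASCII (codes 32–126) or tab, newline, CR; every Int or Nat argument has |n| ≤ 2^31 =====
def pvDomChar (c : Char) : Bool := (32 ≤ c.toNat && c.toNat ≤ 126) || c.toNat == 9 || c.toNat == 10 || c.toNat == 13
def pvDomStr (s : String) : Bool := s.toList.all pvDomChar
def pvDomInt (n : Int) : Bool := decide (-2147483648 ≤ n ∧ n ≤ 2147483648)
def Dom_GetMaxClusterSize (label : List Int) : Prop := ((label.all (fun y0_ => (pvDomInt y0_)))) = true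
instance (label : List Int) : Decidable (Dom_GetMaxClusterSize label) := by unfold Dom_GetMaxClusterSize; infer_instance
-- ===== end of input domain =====

-- B replaces A's nine full scans of label (one per value 0-8) with a single
-- counting pass into a 9-slot table plus one max over the table (objective: faster).

-- ===== PORT A =====
def GetMaxClusterSize (label : List Int) : Int :=
  (PySem.List.pyRange 0 9 1).foldl (fun res i =>
    let iterRes := label.foldl (fun acc el => if el == i then acc + 1 else acc) 0
    if iterRes > res then iterRes else res) 0

-- ===== PORT B =====
-- loop body of B's counting pass (named so the ports and proofs share it verbatim)
def pvStep (c : List Int) (el : Int) : List Int :=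
  if 0 ≤ el ∧ el ≤ 8 then c.set el.toNat (PySem.List.pyGetD c el 0 + 1) else c

def GetMaxClusterSize_alt (label : List Int) : Int :=
  let counts := label.foldl pvStep (List.replicate 9 0)
  -- max(counts): counts is always nonempty (length 9), so max? returns some
  match PySem.List.max? counts (fun x => x) with
  | some m => m
  | none => 0

-- ===== PRECONDITION & SPEC =====
def Spec_GetMaxClusterSize (label : List Int) (out : Int) : Prop := out = GetMaxClusterSize_alt label
instance (label : List Int) (out : Int) : Decidable (Spec_GetMaxClusterSize label out) := by unfold Spec_GetMaxClusterSize; infer_instance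

-- ===== CLAIM (what is proved, stated in full; the proofs are below) =====
def Claim_equal_GetMaxClusterSize : Prop := ∀ (label : List Int), Dom_GetMaxClusterSize label → Spec_GetMaxClusterSize label (GetMaxClusterSize label)

-- ===== LEMMAS AND PROOFS =====

-- A's inner loop counts occurrences of i.
theorem pvInnerCount (i : Int) (l : List Int) (acc : Int) :
    l.foldl (fun acc el => if el == i then acc + 1 else acc) acc = acc + (l.count i : Int) := by
  induction l generalizing acc with
  | nil => simp
  | cons a t ih =>
    rw [List.foldl_cons, ih]
    by_cases h : a = i <;> simp [h, List.count_cons] <;> omega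

-- B's counting pass, on an explicit 9-slot table, adds the count of each value 0..8.
theorem pvCountsSpec (l : List Int) (c0 c1 c2 c3 c4 c5 c6 c7 c8 : Int) :
    l.foldl pvStep [c0, c1, c2, c3, c4, c5, c6, c7, c8] =
    [c0 + (l.count 0 : Int), c1 + (l.count 1 : Int), c2 + (l.count 2 : Int),
     c3 + (l.count 3 : Int), c4 + (l.count 4 : Int), c5 + (l.count 5 : Int),
     c6 + (l.count 6 : Int), c7 + (l.count 7 : Int), c8 + (l.count 8 : Int)] := by
  induction l generalizing c0 c1 c2 c3 c4 c5 c6 c7 c8 with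
  | nil => simp
  | cons a t ih =>
    rw [List.foldl_cons]
    by_cases h : 0 ≤ a ∧ a ≤ 8
    · obtain ⟨h1, h2⟩ := h
      interval_cases a
      · rw [show pvStep [c0, c1, c2, c3, c4, c5, c6, c7, c8] 0 = [c0 + 1, c1, c2, c3, c4, c5, c6, c7, c8] from by
            simp [pvStep, PySem.List.pyGetD], ih]
        simp [List.count_cons]
        omega
      · rw [show pvStep [c0, c1, c2, c3, c4, c5, c6, c7, c8] 1 = [c0, c1 + 1, c2, c3, c4, c5, c6, c7, c8] from by
            simp [pvStep, PySem.List.pyGetD], ih]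
        simp [List.count_cons]
        omega
      · rw [show pvStep [c0, c1, c2, c3, c4, c5, c6, c7, c8] 2 = [c0, c1, c2 + 1, c3, c4, c5, c6, c7, c8] from by
            simp [pvStep, PySem.List.pyGetD], ih]
        simp [List.count_cons]
        omega
      · rw [show pvStep [c0, c1, c2, c3, c4, c5, c6, c7, c8] 3 = [c0, c1, c2, c3 + 1, c4, c5, c6, c7, c8] from by
            simp [pvStep, PySem.List.pyGetD], ih]
        simp [List.count_cons]
        omega
      · rw [show pvStep [c0, c1, c2, c3, c4, c5, c6, c7, c8] 4 = [c0, c1, c2, c3, c4 + 1, c5, c6, c7, c8] from by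
            simp [pvStep, PySem.List.pyGetD], ih]
        simp [List.count_cons]
        omega
      · rw [show pvStep [c0, c1, c2, c3, c4, c5, c6, c7, c8] 5 = [c0, c1, c2, c3, c4, c5 + 1, c6, c7, c8] from by
            simp [pvStep, PySem.List.pyGetD], ih]
        simp [List.count_cons]
        omega
      · rw [show pvStep [c0, c1, c2, c3, c4, c5, c6, c7, c8] 6 = [c0, c1, c2, c3, c4, c5, c6 + 1, c7, c8] from by
            simp [pvStep, PySem.List.pyGetD], ih]
        simp [List.count_cons]
        omega
      · rw [show pvStep [c0, c1, c2, c3, c4, c5, c6, c7, c8] 7 = [c0, c1, c2, c3, c4, c5, c6, c7 + 1, c8] from by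
            simp [pvStep, PySem.List.pyGetD], ih]
        simp [List.count_cons]
        omega
      · rw [show pvStep [c0, c1, c2, c3, c4, c5, c6, c7, c8] 8 = [c0, c1, c2, c3, c4, c5, c6, c7, c8 + 1] from by
            simp [pvStep, PySem.List.pyGetD], ih]
        simp [List.count_cons]
        omega
    · rw [show pvStep [c0, c1, c2, c3, c4, c5, c6, c7, c8] a = [c0, c1, c2, c3, c4, c5, c6, c7, c8] from by simp [pvStep, h], ih]
      simp [List.count_cons]
      omega

theorem pvIfMax (a b : Int) : (if a > b then a else b) = max b a := by
  rw [max_def]; split_ifs <;> omega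

-- ===== VERDICT (by name: the statement is the Claim_ definition above) =====
theorem GetMaxClusterSize_spec : Claim_equal_GetMaxClusterSize := by
  intro label _
  unfold Spec_GetMaxClusterSize GetMaxClusterSize GetMaxClusterSize_alt
  rw [show PySem.List.pyRange 0 9 1 = [0, 1, 2, 3, 4, 5, 6, 7, 8] from by decide]
  rw [show (List.replicate 9 (0 : Int)) = [0, 0, 0, 0, 0, 0, 0, 0, 0] from by decide]
  rw [pvCountsSpec]
  simp only [zero_add, PySem.List.max?_id_cons, List.foldl_cons, List.foldl_nil,
    pvInnerCount, pvIfMax]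
  rw [max_eq_right (by positivity : (0 : Int) ≤ (label.count 0 : Int))]
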